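-- pv_equiv track=rewrite | github.com/Noor-Nasri/daily-leetcode | 541-reverse-string-ii/reverse-string-ii.py | reverseStr
-- ===== SOURCE A (Python) =====
-- def reverseStr(s: str, k: int) -> str:
--     s = list(s)
--
--     for batch_start_ind in range(0, len(s), 2 * k):
--         i = batch_start_ind
--         j = min(i + k, len(s)) - 1
--
--         while i <= j:
--             s[i], s[j] = s[j], s[i]
--             i += 1
--             j -= 1
--
--     return "".join(s)
-- ===== SOURCE B (Python) =====
-- def reverseStr(s: str, k: int) -> str:
--     parts = []
--     for i in range(0, len(s), 2 * k):
--         parts.append(s[i:i + k][::-1])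
--         parts.append(s[i + k:i + 2 * k])
--     return "".join(parts)
-- ===== Notes on version B (the rewrite author's own statement) =====
-- stated objective: simpler
-- what changed: Replaces A's in-place char-list mutation with an inner two-pointer swapping while-loop by building the output directly from reversed/untouched slices per 2k-block and joining them.
-- outside the precondition, e.g. on reverseStr('ab', -1): A returns 'ab', B returns ''
import Mathlib
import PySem

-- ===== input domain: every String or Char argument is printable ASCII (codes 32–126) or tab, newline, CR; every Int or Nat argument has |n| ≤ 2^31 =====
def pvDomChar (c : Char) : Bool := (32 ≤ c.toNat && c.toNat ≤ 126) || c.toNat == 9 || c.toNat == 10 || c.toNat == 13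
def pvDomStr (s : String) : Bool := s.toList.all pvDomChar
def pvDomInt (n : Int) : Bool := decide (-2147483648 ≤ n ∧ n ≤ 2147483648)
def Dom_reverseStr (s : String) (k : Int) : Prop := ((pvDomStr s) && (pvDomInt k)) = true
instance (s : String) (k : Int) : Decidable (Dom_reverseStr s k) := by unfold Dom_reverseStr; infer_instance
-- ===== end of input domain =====

-- B builds the result from reversed/untouched slices per 2k-block instead of A's
-- in-place two-pointer swapping on a mutable char list (objective: simpler).

-- ===== PORT A =====
-- the swap `s[i], s[j] = s[j], s[i]`; both indices are in range whenever the Python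
-- loop body runs (Pre_ gives k ≥ 1), the fallback branch is only for Lean totality.
def pvSwapAt (l : List Char) (i j : Nat) : List Char :=
  match l[i]?, l[j]? with
  | some a, some b => (l.set i b).set j a
  | _, _ => l

-- the inner `while i <= j` loop of A
def pvWhileA (l : List Char) (i j : Int) : List Char :=
  if i ≤ j then pvWhileA (pvSwapAt l i.toNat j.toNat) (i + 1) (j - 1) else l
termination_by (j + 1 - i).toNat
decreasing_by omega

def reverseStr (s : String) (k : Int) : String :=
  let cs := s.toList
  let cs := (PySem.List.pyRange 0 (cs.length : Int) (2 * k)).foldl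
    (fun l b => pvWhileA l b (min (b + k) (l.length : Int) - 1)) cs
  String.ofList cs

-- ===== PORT B =====
def reverseStr_alt (s : String) (k : Int) : String :=
  let cs := s.toList
  let parts := (PySem.List.pyRange 0 (cs.length : Int) (2 * k)).foldl
    (fun parts i =>
      parts ++ [(PySem.List.slice cs (some i) (some (i + k))).reverse,
                PySem.List.slice cs (some (i + k)) (some (i + 2 * k))]) []
  String.ofList parts.flatten

-- ===== PRECONDITION & SPEC =====
-- Pre_ restricts to the problem's natural domain k ≥ 1: at k = 0 A raises ValueError
-- (range step 0); for k < 0 the range is empty, so A's returning s unchanged there is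
-- an artefact of empty iteration outside the task's domain (B returns "" there).
def Pre_reverseStr (s : String) (k : Int) : Prop := 1 ≤ k
instance (s : String) (k : Int) : Decidable (Pre_reverseStr s k) := by unfold Pre_reverseStr; infer_instance
def pvWitness_reverseStr : String × Int := ("abcdefg", 2)

def Spec_reverseStr (s : String) (k : Int) (out : String) : Prop := out = reverseStr_alt s k
instance (s : String) (k : Int) (out : String) : Decidable (Spec_reverseStr s k out) := by unfold Spec_reverseStr; infer_instance

-- ===== CLAIM (what is proved, stated in full; the proofs are below) =====
def Claim_equal_reverseStr : Prop := ∀ (s : String) (k : Int), Dom_reverseStr s k → Pre_reverseStr s k → Spec_reverseStr s k (reverseStr s k)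

-- ===== LEMMAS AND PROOFS =====

-- the common block-by-block shape of the result
def chunkSpec (k : Nat) (l : List Char) : List Char :=
  if h : 1 ≤ k ∧ l ≠ [] then
    (l.take k).reverse ++ ((l.drop k).take k ++ chunkSpec k (l.drop (2 * k)))
  else []
termination_by l.length
decreasing_by
  rcases h with ⟨hk, hl⟩
  have : 0 < l.length := List.length_pos_iff.mpr hl
  simp [List.length_drop]; omega

lemma chunkSpec_nil (k : Nat) : chunkSpec k [] = [] := by
  rw [chunkSpec]; simp

lemma chunkSpec_cons (k : Nat) (l : List Char) (hk : 1 ≤ k) (hl : l ≠ []) :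
    chunkSpec k l = (l.take k).reverse ++ ((l.drop k).take k ++ chunkSpec k (l.drop (2 * k))) := by
  rw [chunkSpec, dif_pos ⟨hk, hl⟩]

-- pyRange with a positive step: empty and cons forms
lemma pyRange_pos_nil (a b s : Int) (hs : 0 < s) (h : b ≤ a) :
    PySem.List.pyRange a b s = [] := by
  rw [PySem.List.pyRange_of_pos a b hs]
  simp [show ¬ a < b by omega]

lemma pyRange_pos_cons (a b s : Int) (hs : 0 < s) (h : a < b) :
    PySem.List.pyRange a b s = a :: PySem.List.pyRange (a + s) b s := by
  rw [PySem.List.pyRange_of_pos a b hs, PySem.List.pyRange_of_pos (a + s) b hs]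
  have hx : b - a + s - 1 = (b - a - 1) + 1 * s := by ring
  have hq : (b - a + s - 1) / s = (b - a - 1) / s + 1 := by
    rw [hx, Int.add_mul_ediv_right _ _ (by omega : s ≠ 0)]
  by_cases hb : a + s < b
  · have hinner : b - (a + s) + s - 1 = b - a - 1 := by ring
    have hnn : 0 ≤ (b - a - 1) / s := Int.ediv_nonneg (by omega) (by omega)
    rw [if_pos h, if_pos hb, hinner, hq]
    have ht : ((b - a - 1) / s + 1).toNat = ((b - a - 1) / s).toNat + 1 := by omega
    rw [ht, List.range_succ_eq_map, List.map_cons, List.map_map]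
    simp only [Int.natCast_zero, mul_zero, add_zero]
    congr 1
    apply List.map_congr_left
    intro kk _
    simp [Nat.succ_eq_add_one]; ring
  · have h0 : (b - a - 1) / s = 0 := Int.ediv_eq_zero_of_lt (by omega) (by omega)
    rw [if_pos h, if_neg hb, hq, h0]
    simp

lemma pvSwapAt_spec (p mid q : List Char) (c d : Char) :
    pvSwapAt (p ++ ((c :: (mid ++ [d])) ++ q)) p.length (p.length + (mid.length + 1))
      = p ++ ((d :: (mid ++ [c])) ++ q) := by
  have h1 : (p ++ ((c :: (mid ++ [d])) ++ q))[p.length]? = some c := by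
    rw [List.getElem?_append_right (le_refl _)]; simp
  have h2 : (p ++ ((c :: (mid ++ [d])) ++ q))[p.length + (mid.length + 1)]? = some d := by
    rw [List.getElem?_append_right (by omega)]
    have h3 : p.length + (mid.length + 1) - p.length = mid.length + 1 := by omega
    rw [h3]; simp
  rw [pvSwapAt, h1, h2]
  dsimp only
  have s1 : (p ++ ((c :: (mid ++ [d])) ++ q)).set p.length d
      = p ++ ((d :: (mid ++ [d])) ++ q) := by
    rw [List.set_append, if_neg (lt_irrefl _)]
    congr 1
    rw [Nat.sub_self, List.set_append, if_pos (by simp)]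
    simp
  rw [s1, List.set_append, if_neg (by omega)]
  congr 1
  have h5 : p.length + (mid.length + 1) - p.length = mid.length + 1 := by omega
  rw [h5, List.set_append, if_pos (by simp)]
  congr 1
  rw [List.set_cons_succ, List.set_append, if_neg (lt_irrefl _)]
  simp

lemma pvSwapAt_singleton (p q : List Char) (c : Char) :
    pvSwapAt (p ++ ((c :: []) ++ q)) p.length p.length = p ++ ((c :: []) ++ q) := by
  have h1 : (p ++ ((c :: []) ++ q))[p.length]? = some c := by
    rw [List.getElem?_append_right (le_refl _)]; simp
  rw [pvSwapAt, h1]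
  dsimp only
  rw [List.set_set, List.set_append, if_neg (lt_irrefl _), Nat.sub_self,
    List.set_append, if_pos (by simp)]
  simp

-- the two-pointer loop reverses the designated segment
lemma pvWhileA_spec : ∀ (n : Nat) (m p q : List Char), m.length = n →
    pvWhileA (p ++ (m ++ q)) (p.length : Int) ((p.length : Int) + (m.length : Int) - 1)
      = p ++ (m.reverse ++ q) := by
  intro n
  induction n using Nat.strong_induction_on with
  | _ n ih =>
    intro m p q hm
    match m with
    | [] =>
      rw [pvWhileA, if_neg (by simp)]
      simp
    | [c] =>
      rw [pvWhileA, if_pos (by simp)]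
      simp only [List.length_cons, List.length_nil]
      have e1 : ((p.length : Int) + ((0 + 1 : Nat) : Int) - 1) = (p.length : Int) := by push_cast; ring
      have e2 : ((p.length : Int)).toNat = p.length := by omega
      rw [e1, e2, pvSwapAt_singleton, pvWhileA, if_neg (by omega)]
      simp
    | c :: (m₀ :: m₁) =>
      have hne : (m₀ :: m₁) ≠ [] := by simp
      obtain ⟨mid, d, hmd⟩ : ∃ mid d, (m₀ :: m₁) = mid ++ [d] := by
        refine ⟨(m₀ :: m₁).dropLast, (m₀ :: m₁).getLast hne, ?_⟩
        exact (List.dropLast_append_getLast hne).symm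
      rw [hmd]
      have hlen : (c :: (mid ++ [d])).length = mid.length + 2 := by simp
      rw [pvWhileA, if_pos (by simp; omega)]
      have e1 : ((p.length : Int) + ((c :: (mid ++ [d])).length : Int) - 1).toNat
          = p.length + (mid.length + 1) := by simp at hlen ⊢; omega
      have e2 : ((p.length : Int)).toNat = p.length := by omega
      rw [e1, e2, pvSwapAt_spec]
      have hassoc : p ++ ((d :: (mid ++ [c])) ++ q) = (p ++ [d]) ++ (mid ++ ([c] ++ q)) := by
        simp
      rw [hassoc]
      have hi : (p.length : Int) + 1 = ((p ++ [d]).length : Int) := by simp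
      have hj : (p.length : Int) + ((c :: (mid ++ [d])).length : Int) - 1 - 1
          = ((p ++ [d]).length : Int) + (mid.length : Int) - 1 := by simp; omega
      rw [hi, hj, ih mid.length (by rw [← hm, hmd]; simp) mid (p ++ [d]) ([c] ++ q) rfl]
      simp

-- A's fold over the block starts
lemma foldA_main (k : Nat) (hk : 1 ≤ k) : ∀ (n : Nat) (done rest : List Char), rest.length = n →
    (PySem.List.pyRange (done.length : Int) ((done.length + rest.length : Nat) : Int) ((2 * k : Nat) : Int)).foldl
      (fun l b => pvWhileA l b (min (b + (k : Int)) (l.length : Int) - 1)) (done ++ rest)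
      = done ++ chunkSpec k rest := by
  intro n
  induction n using Nat.strong_induction_on with
  | _ n ih =>
    intro done rest hn
    by_cases hr : rest = []
    · subst hr
      rw [pyRange_pos_nil _ _ _ (by omega) (by simp)]
      simp [chunkSpec_nil]
    · have hlt : (done.length : Int) < ((done.length + rest.length : Nat) : Int) := by
        have : 0 < rest.length := List.length_pos_iff.mpr hr
        push_cast; omega
      rw [pyRange_pos_cons _ _ _ (by omega) hlt, List.foldl_cons]
      -- the first iteration reverses rest.take k
      have hsplit : done ++ rest = done ++ (rest.take k ++ rest.drop k) := by
        rw [List.take_append_drop]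
      have hjv : min ((done.length : Int) + (k : Int)) (((done ++ rest).length : Int)) - 1
          = (done.length : Int) + ((rest.take k).length : Int) - 1 := by
        simp [List.length_take]
      have step1 : pvWhileA (done ++ rest) (done.length : Int)
            (min ((done.length : Int) + (k : Int)) (((done ++ rest).length : Int)) - 1)
          = done ++ ((rest.take k).reverse ++ rest.drop k) := by
        rw [hjv, hsplit]
        exact pvWhileA_spec (rest.take k).length (rest.take k) done (rest.drop k) rfl
      rw [step1]
      by_cases h2k : 2 * k ≤ rest.length
      · -- a full block was processed; recurse on the rest
        have hdd : (rest.drop k).drop k = rest.drop (2 * k) := by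
          rw [List.drop_drop]; congr 1; omega
        have hre : done ++ ((rest.take k).reverse ++ rest.drop k)
            = (done ++ ((rest.take k).reverse ++ (rest.drop k).take k)) ++ rest.drop (2 * k) := by
          rw [← hdd]
          conv_lhs => rw [show rest.drop k = (rest.drop k).take k ++ ((rest.drop k).drop k) from (List.take_append_drop _ _).symm]
          simp
        have hlen' : (done ++ ((rest.take k).reverse ++ (rest.drop k).take k)).length
            = done.length + 2 * k := by
          simp [List.length_take, List.length_drop]
          omega
        have hstart : (done.length : Int) + ((2 * k : Nat) : Int)
            = (((done ++ ((rest.take k).reverse ++ (rest.drop k).take k)).length : Nat) : Int) := by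
          rw [hlen']; push_cast; ring
        have hstop : ((done.length + rest.length : Nat) : Int)
            = (((done ++ ((rest.take k).reverse ++ (rest.drop k).take k)).length + (rest.drop (2 * k)).length : Nat) : Int) := by
          rw [hlen']
          simp [List.length_drop]
          omega
        rw [hre, hstart, hstop,
          ih (rest.drop (2 * k)).length (by simp [List.length_drop]; omega) _ _ rfl]
        rw [chunkSpec_cons k rest hk hr]
        simp
      · -- short tail: the range is exhausted after this block
        have hnil : PySem.List.pyRange ((done.length : Int) + ((2 * k : Nat) : Int))
            ((done.length + rest.length : Nat) : Int) ((2 * k : Nat) : Int) = [] := by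
          apply pyRange_pos_nil _ _ _ (by omega)
          push_cast; omega
        rw [hnil, List.foldl_nil, chunkSpec_cons k rest hk hr]
        have hdrop2 : rest.drop (2 * k) = [] := by
          apply List.drop_eq_nil_of_le; omega
        have htk : (rest.drop k).take k = rest.drop k := by
          apply List.take_of_length_le; simp [List.length_drop]; omega
        rw [hdrop2, chunkSpec_nil, htk]
        simp

-- B's fold over the block starts
lemma foldB_main (k : Nat) (hk : 1 ≤ k) (cs : List Char) : ∀ (n : Nat) (b : Nat) (acc : List (List Char)),
    cs.length - b = n →
    ((PySem.List.pyRange (b : Int) ((cs.length : Nat) : Int) ((2 * k : Nat) : Int)).foldl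
      (fun parts i =>
        parts ++ [(PySem.List.slice cs (some i) (some (i + (k : Int)))).reverse,
                  PySem.List.slice cs (some (i + (k : Int))) (some (i + 2 * (k : Int)))]) acc).flatten
      = acc.flatten ++ chunkSpec k (cs.drop b) := by
  intro n
  induction n using Nat.strong_induction_on with
  | _ n ih =>
    intro b acc hn
    by_cases hb : b < cs.length
    · rw [pyRange_pos_cons _ _ _ (by omega) (by omega), List.foldl_cons]
      have hs1 : PySem.List.slice cs (some (b : Int)) (some ((b : Int) + (k : Int)))
          = (cs.drop b).take k := PySem.List.slice_natCast_add cs b k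
      have hs2 : PySem.List.slice cs (some ((b : Int) + (k : Int))) (some ((b : Int) + 2 * (k : Int)))
          = ((cs.drop b).drop k).take k := by
        have e1 : (b : Int) + (k : Int) = ((b + k : Nat) : Int) := by push_cast; ring
        have e2 : (b : Int) + 2 * (k : Int) = ((b + k : Nat) : Int) + ((k : Nat) : Int) := by push_cast; ring
        rw [e1, e2, PySem.List.slice_natCast_add cs (b + k) k, List.drop_drop]
      have estart : (b : Int) + ((2 * k : Nat) : Int) = ((b + 2 * k : Nat) : Int) := by push_cast; ring
      rw [hs1, hs2, estart, ih (cs.length - (b + 2 * k)) (by omega) (b + 2 * k) _ rfl]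
      have hd2 : cs.drop (b + 2 * k) = (cs.drop b).drop (2 * k) := by
        rw [List.drop_drop]
      rw [hd2, chunkSpec_cons k (cs.drop b) hk (by
        intro h
        have := congrArg List.length h
        simp [List.length_drop] at this
        omega)]
      simp
    · rw [pyRange_pos_nil _ _ _ (by omega) (by omega), List.foldl_nil]
      rw [List.drop_eq_nil_of_le (by omega), chunkSpec_nil]
      simp

-- ===== VERDICT (by name: the statement is the Claim_ definition above) =====
theorem reverseStr_spec : Claim_equal_reverseStr := by
  intro s k _ hk
  replace hk : 1 ≤ k := hk
  simp only [Spec_reverseStr, reverseStr, reverseStr_alt]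
  have hA := foldA_main k.toNat (by omega) s.toList.length [] s.toList rfl
  have hB := foldB_main k.toNat (by omega) s.toList s.toList.length 0 [] (by omega)
  have hkn : ((k.toNat : Nat) : Int) = k := by omega
  have h2k : ((2 * k.toNat : Nat) : Int) = 2 * k := by omega
  rw [hkn, h2k] at hA hB
  simp only [List.nil_append, List.length_nil, Int.natCast_zero, Nat.zero_add,
    List.drop_zero, List.flatten_nil] at hA hB
  rw [hA]
  congr 1
  rw [← hB]
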